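-- pv_equiv track=rewrite | github.com/dop3file/equilibrium | parserr.py | add_queue
-- ===== SOURCE A (Python) =====
-- def add_queue(lexemes, line_start):
--     """
--     Принимает список лексем и формирует список для выполнения команд
--     :param lexemes: лексемы
--     :param line_start: лайн на котором остановились
--     :return: None
--     """
--     line_start, line_end = line_start, line_start
--     list_executable_code = []
--
--     for line in range(line_start, len(lexemes)):
--         if lexemes[line] == {'end_if': 0}:
--             break
--         list_executable_code.append(lexemes[line])
--     return list_executable_code
-- ===== SOURCE B (Python) =====
-- def add_queue(lexemes, line_start):
--     """Boundary-find-then-slice: take the tail from line_start, cut at the sentinel."""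
--     rest = lexemes[line_start:]
--     end = {'end_if': 0}
--     if end in rest:
--         return rest[:rest.index(end)]
--     return rest
-- ===== Notes on version B (the rewrite author's own statement) =====
-- stated objective: simpler
-- what changed: Replaces the index-driven append loop with boundary-find-then-slice: slice off the tail lexemes[line_start:], locate the sentinel {'end_if':0} with one index lookup, and return a single bulk slice up to it (or the whole tail if absent).
-- outside the precondition, e.g. on add_queue([{'a': 1}, {'end_if': 0}, {'b': 2}], -1): A returns [{'b': 2}, {'a': 1}], B returns [{'b': 2}]
import Mathlib
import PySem

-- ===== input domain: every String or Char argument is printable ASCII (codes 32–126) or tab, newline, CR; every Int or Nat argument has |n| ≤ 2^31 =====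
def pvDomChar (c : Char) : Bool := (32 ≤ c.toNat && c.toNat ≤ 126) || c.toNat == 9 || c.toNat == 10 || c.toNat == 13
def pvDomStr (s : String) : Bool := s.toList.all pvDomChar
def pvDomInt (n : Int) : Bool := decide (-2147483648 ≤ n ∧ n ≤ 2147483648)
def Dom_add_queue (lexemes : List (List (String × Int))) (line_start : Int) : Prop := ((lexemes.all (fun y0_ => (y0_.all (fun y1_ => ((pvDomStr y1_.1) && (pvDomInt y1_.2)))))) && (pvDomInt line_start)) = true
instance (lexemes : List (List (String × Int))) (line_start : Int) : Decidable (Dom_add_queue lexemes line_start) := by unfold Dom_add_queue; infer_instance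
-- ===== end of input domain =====

-- ===== PORT A =====
-- B changes A's index-driven append loop into slice-find-slice; one line: Pre_ keeps the
-- natural domain 0 <= line_start (negative starts hit Python's negative-index wraparound).

-- the for-loop of A: iterates the index list, appends each line, breaks on the sentinel;
-- pyGet? = none is Python's IndexError (excluded by Pre_): the loop stops there.
def addQueueLoop (lexemes : List (List (String × Int))) :
    List Int → List (List (String × Int)) → List (List (String × Int))
  | [], acc => acc
  | i :: rest, acc =>
    match PySem.List.pyGet? lexemes i with
    | none => acc
    | some lx =>
      if lx = [("end_if", 0)] then acc
      else addQueueLoop lexemes rest (acc ++ [lx])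

def add_queue (lexemes : List (List (String × Int))) (line_start : Int) : List (List (String × Int)) :=
  addQueueLoop lexemes (PySem.List.pyRange line_start (lexemes.length : Int) 1) []

-- ===== PORT B =====
def add_queue_alt (lexemes : List (List (String × Int))) (line_start : Int) : List (List (String × Int)) :=
  let rest := PySem.List.slice lexemes (some line_start) none
  let endL : List (String × Int) := [("end_if", 0)]
  if endL ∈ rest then
    match PySem.List.index? rest endL with
    | some i => PySem.List.slice rest none (some (i : Int))
    | none => rest  -- unreachable: guarded by the membership test, as in Source B
  else rest

-- ===== PRECONDITION & SPEC =====
-- Pre_ excludes negative line_start (outside the natural line-index domain): there A either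
-- raises IndexError or returns a wraparound artefact of negative indexing that re-reads the tail.
def Pre_add_queue (lexemes : List (List (String × Int))) (line_start : Int) : Prop :=
  0 ≤ line_start
instance (lexemes : List (List (String × Int))) (line_start : Int) : Decidable (Pre_add_queue lexemes line_start) := by unfold Pre_add_queue; infer_instance
def pvWitness_add_queue : (List (List (String × Int))) × Int :=
  ([[("a", 1)], [("end_if", 0)], [("b", 2)]], 0)
def Spec_add_queue (lexemes : List (List (String × Int))) (line_start : Int) (out : List (List (String × Int))) : Prop := out = add_queue_alt lexemes line_start
instance (lexemes : List (List (String × Int))) (line_start : Int) (out : List (List (String × Int))) : Decidable (Spec_add_queue lexemes line_start out) := by unfold Spec_add_queue; infer_instance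

-- ===== CLAIM (what is proved, stated in full; the proofs are below) =====
def Claim_equal_add_queue : Prop := ∀ (lexemes : List (List (String × Int))) (line_start : Int), Dom_add_queue lexemes line_start → Pre_add_queue lexemes line_start → Spec_add_queue lexemes line_start (add_queue lexemes line_start)

-- ===== LEMMAS AND PROOFS =====

-- B's cut of a tail t: take up to the first sentinel, or all of t.
def cutB (t : List (List (String × Int))) : List (List (String × Int)) :=
  match PySem.List.index? t [("end_if", 0)] with
  | some i => t.take i
  | none => t

theorem cutB_cons_sentinel (t : List (List (String × Int))) :
    cutB ([("end_if", 0)] :: t) = [] := by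
  unfold cutB
  rw [PySem.List.index?_cons_self]
  simp

theorem cutB_cons_of_ne (x : List (String × Int)) (t : List (List (String × Int)))
    (hx : x ≠ [("end_if", 0)]) : cutB (x :: t) = x :: cutB t := by
  unfold cutB
  rw [PySem.List.index?_cons_of_ne t hx]
  cases PySem.List.index? t [("end_if", 0)] <;> simp

-- A's loop over the indices [n, len) computes acc ++ cutB (drop n lexemes).
theorem addQueueLoop_eq_cutB (lexemes : List (List (String × Int))) :
    ∀ (k n : Nat) (acc : List (List (String × Int))), lexemes.length - n = k →
      addQueueLoop lexemes (PySem.List.pyRange (n : Int) (lexemes.length : Int) 1) acc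
        = acc ++ cutB (lexemes.drop n) := by
  intro k
  induction k with
  | zero =>
    intro n acc hk
    have hn : lexemes.length ≤ n := by omega
    have hrange : PySem.List.pyRange (n : Int) (lexemes.length : Int) 1 = [] := by
      simp [PySem.List.pyRange_one, Int.toNat_of_nonpos (by omega : (lexemes.length : Int) - n ≤ 0)]
    rw [hrange, List.drop_eq_nil_of_le hn]
    simp [addQueueLoop, cutB, PySem.List.index?_eq_idxOf?]
  | succ k ih =>
    intro n acc hk
    have hn : n < lexemes.length := by omega
    rw [PySem.List.pyRange_one_cons (by exact_mod_cast hn)]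
    have hget : PySem.List.pyGet? lexemes (n : Int) = some lexemes[n] := by
      rw [PySem.List.pyGet?_natCast]
      exact List.getElem?_eq_getElem hn
    have hdrop : lexemes.drop n = lexemes[n] :: lexemes.drop (n + 1) :=
      List.drop_eq_getElem_cons hn
    by_cases hs : lexemes[n] = [("end_if", 0)]
    · simp only [addQueueLoop, hget, if_pos hs]
      rw [hdrop, hs, cutB_cons_sentinel, List.append_nil]
    · simp only [addQueueLoop, hget, if_neg hs]
      have : ((n : Int) + 1) = ((n + 1 : Nat) : Int) := by push_cast; ring
      rw [this, ih (n + 1) (acc ++ [lexemes[n]]) (by omega)]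
      rw [hdrop, cutB_cons_of_ne _ _ hs]
      simp

-- B equals cutB of the same tail.
theorem add_queue_alt_eq_cutB (lexemes : List (List (String × Int))) (line_start : Int)
    (h : 0 ≤ line_start) :
    add_queue_alt lexemes line_start = cutB (lexemes.drop line_start.toNat) := by
  simp only [add_queue_alt, cutB]
  rw [PySem.List.slice_from lexemes h]
  set t := lexemes.drop line_start.toNat with ht
  by_cases hm : [("end_if", 0)] ∈ t
  · simp only [if_pos hm]
    have hsome : (PySem.List.index? t [("end_if", 0)]).isSome := by
      rw [PySem.List.index?_isSome_iff t]; exact hm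
    obtain ⟨i, hi⟩ := Option.isSome_iff_exists.mp hsome
    rw [hi]
    exact PySem.List.slice_to_natCast t i
  · simp only [if_neg hm]
    have hnone : PySem.List.index? t [("end_if", 0)] = none := by
      rw [PySem.List.index?_eq_none_iff t]; exact hm
    rw [hnone]

-- ===== VERDICT (by name: the statement is the Claim_ definition above) =====
theorem add_queue_spec : Claim_equal_add_queue := by
  intro lexemes line_start _ hpre
  unfold Pre_add_queue at hpre
  unfold Spec_add_queue
  rw [add_queue_alt_eq_cutB lexemes line_start hpre]
  unfold add_queue
  have hcast : line_start = ((line_start.toNat : Nat) : Int) := by omega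
  rw [hcast]
  rw [addQueueLoop_eq_cutB lexemes (lexemes.length - line_start.toNat) line_start.toNat [] rfl]
  simp only [List.nil_append, Int.toNat_natCast]
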